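-- pv_equiv track=rewrite | github.com/1UnFazed1/dp9-attractiepark | dp9_main.py | maak_dagprogramma
-- ===== SOURCE A (Python) =====
-- def maak_dagprogramma(attracties, horeca, souvenirwinkel, max_tijd):
--     dagprogramma = []
--     totale_tijd = 0
--
--     # FR6: eerste attractie 2x toevoegen als favoriet
--     if len(attracties) > 0:
--         favoriete_attractie = attracties[0]
--
--         tijd_favoriet = (
--             favoriete_attractie["geschatte_wachttijd"] +
--             favoriete_attractie["doorlooptijd"]
--         )
--
--         if totale_tijd + tijd_favoriet <= max_tijd:
--             dagprogramma.append(favoriete_attractie)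
--             totale_tijd += tijd_favoriet
--
--         if totale_tijd + tijd_favoriet <= max_tijd:
--             dagprogramma.append(favoriete_attractie)
--             totale_tijd += tijd_favoriet
--
--     # overige attracties toevoegen
--     for attractie in attracties[1:]:
--         tijd_attractie = (
--             attractie["geschatte_wachttijd"] +
--             attractie["doorlooptijd"]
--         )
--
--         if totale_tijd + tijd_attractie <= max_tijd:
--             dagprogramma.append(attractie)
--             totale_tijd += tijd_attractie
--
--     # FR10: horeca toevoegen
--     if horeca:
--         tijd_horeca = horeca["geschatte_wachttijd"] + horeca["doorlooptijd"]
--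
--         if totale_tijd + tijd_horeca <= max_tijd:
--             dagprogramma.append(horeca)
--             totale_tijd += tijd_horeca
--
--     # FR13: souvenirwinkel ALTIJD toevoegen (zonder check)
--     if souvenirwinkel:
--         tijd_winkel = (
--             souvenirwinkel["geschatte_wachttijd"] +
--             souvenirwinkel["doorlooptijd"]
--         )
--
--         dagprogramma.append(souvenirwinkel)
--         totale_tijd += tijd_winkel
--
--     return dagprogramma, totale_tijd
-- ===== SOURCE B (Python) =====
-- def maak_dagprogramma(attracties, horeca, souvenirwinkel, max_tijd):
--     # Recursive planner that threads the REMAINING budget downward and builds the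
--     # programme by consing on the way back; the total time is reconstructed at the
--     # end as max_tijd - rest. Horeca is the base case of the recursion; the
--     # souvenir shop is an unconditional final step outside the budgeted plan.
--     def duur(bezoek):
--         return bezoek["geschatte_wachttijd"] + bezoek["doorlooptijd"]
--
--     def plan(bezoeken, rest):
--         if not bezoeken:
--             if horeca:
--                 t = duur(horeca)
--                 if t <= rest:
--                     return [horeca], rest - t
--             return [], rest
--         kop, staart = bezoeken[0], bezoeken[1:]
--         t = duur(kop)
--         if t <= rest:
--             gepland, over = plan(staart, rest - t)
--             return [kop] + gepland, over
--         return plan(staart, rest)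
--
--     programma, rest = plan(attracties[:1] + attracties, max_tijd)
--     totale_tijd = max_tijd - rest
--     if souvenirwinkel:
--         programma = programma + [souvenirwinkel]
--         totale_tijd += duur(souvenirwinkel)
--     return programma, totale_tijd
-- ===== Notes on version B (the rewrite author's own statement) =====
-- stated objective: alternative
-- what changed: Replaces A's iterative state-accumulating blocks by a recursive planner that threads the remaining budget downward (consing results on the way back, horeca handled in the recursion's base case) and reconstructs the total as max_tijd - rest; only the unconditional souvenir step stays outside.
-- outside the precondition, e.g. on maak_dagprogramma([{'doorlooptijd': 3}], None, None, 10): A raises KeyError, B raises KeyError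
import Mathlib
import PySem

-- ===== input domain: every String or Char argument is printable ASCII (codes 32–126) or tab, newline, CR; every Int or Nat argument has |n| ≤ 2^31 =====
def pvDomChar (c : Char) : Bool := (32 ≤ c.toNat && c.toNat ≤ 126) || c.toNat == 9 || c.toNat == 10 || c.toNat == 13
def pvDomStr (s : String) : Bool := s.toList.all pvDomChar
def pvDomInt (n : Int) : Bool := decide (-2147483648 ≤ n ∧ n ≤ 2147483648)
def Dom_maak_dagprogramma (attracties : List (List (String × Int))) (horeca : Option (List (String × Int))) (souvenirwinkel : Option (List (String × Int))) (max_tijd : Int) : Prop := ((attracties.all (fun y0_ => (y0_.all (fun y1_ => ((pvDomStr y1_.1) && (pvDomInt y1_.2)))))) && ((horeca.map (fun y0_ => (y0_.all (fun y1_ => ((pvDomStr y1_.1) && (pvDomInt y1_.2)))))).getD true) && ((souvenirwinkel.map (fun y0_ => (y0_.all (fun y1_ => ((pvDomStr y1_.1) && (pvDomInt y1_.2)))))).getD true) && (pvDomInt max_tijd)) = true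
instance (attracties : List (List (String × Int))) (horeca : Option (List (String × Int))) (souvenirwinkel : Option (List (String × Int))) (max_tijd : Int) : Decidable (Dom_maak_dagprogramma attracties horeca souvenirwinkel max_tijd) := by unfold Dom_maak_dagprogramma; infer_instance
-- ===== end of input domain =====

-- ===== PORT A =====
-- B replaces A's iterative accumulating blocks by a recursive budget-countdown planner: alternative decomposition, same cost.
-- d["geschatte_wachttijd"] etc.: first-match assoc lookup; Pre_ guarantees the keys exist (Python KeyError otherwise)
def pvTijd (d : List (String × Int)) : Int :=
  (d.lookup "geschatte_wachttijd").getD 0 + (d.lookup "doorlooptijd").getD 0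

def maak_dagprogramma (attracties : List (List (String × Int))) (horeca : Option (List (String × Int))) (souvenirwinkel : Option (List (String × Int))) (max_tijd : Int) : (List (List (String × Int))) × Int :=
  -- FR6: first attraction added twice as favourite (each time budget-checked)
  let st1 : (List (List (String × Int))) × Int :=
    match attracties with
    | [] => ([], 0)
    | fav :: _ =>
      let tijd_favoriet := pvTijd fav
      let stA : (List (List (String × Int))) × Int :=
        if 0 + tijd_favoriet ≤ max_tijd then ([] ++ [fav], 0 + tijd_favoriet) else ([], 0)
      if stA.2 + tijd_favoriet ≤ max_tijd then (stA.1 ++ [fav], stA.2 + tijd_favoriet) else stA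
  -- remaining attractions
  let st2 := (attracties.drop 1).foldl
    (fun (st : (List (List (String × Int))) × Int) a =>
      let t := pvTijd a
      if st.2 + t ≤ max_tijd then (st.1 ++ [a], st.2 + t) else st) st1
  -- FR10: horeca (truthy = some nonempty dict)
  let st3 :=
    match horeca with
    | none => st2
    | some h =>
      if h = [] then st2
      else
        let t := pvTijd h
        if st2.2 + t ≤ max_tijd then (st2.1 ++ [h], st2.2 + t) else st2
  -- FR13: souvenir shop always added, no budget check
  match souvenirwinkel with
  | none => st3
  | some s => if s = [] then st3 else (st3.1 ++ [s], st3.2 + pvTijd s)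

-- ===== PORT B =====
def pvDuur (bezoek : List (String × Int)) : Int :=
  (bezoek.lookup "geschatte_wachttijd").getD 0 + (bezoek.lookup "doorlooptijd").getD 0

-- B's inner recursive planner: threads the remaining budget, conses kept visits on the way back;
-- the horeca closure variable is the base case
def pvPlan (horeca : Option (List (String × Int))) : List (List (String × Int)) → Int → (List (List (String × Int))) × Int
  | [], rest =>
    (match horeca with
     | some h =>
       if h = [] then ([], rest)
       else
         let t := pvDuur h
         if t ≤ rest then ([h], rest - t) else ([], rest)
     | none => ([], rest))
  | kop :: staart, rest =>
    let t := pvDuur kop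
    if t ≤ rest then
      let r := pvPlan horeca staart (rest - t)
      (kop :: r.1, r.2)
    else pvPlan horeca staart rest

def maak_dagprogramma_alt (attracties : List (List (String × Int))) (horeca : Option (List (String × Int))) (souvenirwinkel : Option (List (String × Int))) (max_tijd : Int) : (List (List (String × Int))) × Int :=
  let r := pvPlan horeca (attracties.take 1 ++ attracties) max_tijd
  let totale_tijd := max_tijd - r.2
  match souvenirwinkel with
  | none => (r.1, totale_tijd)
  | some s => if s = [] then (r.1, totale_tijd) else (r.1 ++ [s], totale_tijd + pvDuur s)

-- ===== PRECONDITION & SPEC =====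
def pvHeeftTijden (d : List (String × Int)) : Bool :=
  (d.lookup "geschatte_wachttijd").isSome && (d.lookup "doorlooptijd").isSome

-- Pre_ excludes exactly the inputs where Python A raises KeyError: a dict (any attractie,
-- or a truthy horeca/souvenirwinkel) missing "geschatte_wachttijd" or "doorlooptijd".
def Pre_maak_dagprogramma (attracties : List (List (String × Int))) (horeca : Option (List (String × Int))) (souvenirwinkel : Option (List (String × Int))) (max_tijd : Int) : Prop :=
  (attracties.all pvHeeftTijden
    && (match horeca with | none => true | some h => h.isEmpty || pvHeeftTijden h)
    && (match souvenirwinkel with | none => true | some s => s.isEmpty || pvHeeftTijden s)) = true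
instance (attracties : List (List (String × Int))) (horeca : Option (List (String × Int))) (souvenirwinkel : Option (List (String × Int))) (max_tijd : Int) : Decidable (Pre_maak_dagprogramma attracties horeca souvenirwinkel max_tijd) := by unfold Pre_maak_dagprogramma; infer_instance

def pvWitness_maak_dagprogramma : (List (List (String × Int))) × (Option (List (String × Int))) × (Option (List (String × Int))) × Int :=
  ([[("geschatte_wachttijd", 5), ("doorlooptijd", 3)]], none, some [("geschatte_wachttijd", 1), ("doorlooptijd", 2)], 20)

def Spec_maak_dagprogramma (attracties : List (List (String × Int))) (horeca : Option (List (String × Int))) (souvenirwinkel : Option (List (String × Int))) (max_tijd : Int) (out : (List (List (String × Int))) × Int) : Prop := out = maak_dagprogramma_alt attracties horeca souvenirwinkel max_tijd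
instance (attracties : List (List (String × Int))) (horeca : Option (List (String × Int))) (souvenirwinkel : Option (List (String × Int))) (max_tijd : Int) (out : (List (List (String × Int))) × Int) : Decidable (Spec_maak_dagprogramma attracties horeca souvenirwinkel max_tijd out) := by unfold Spec_maak_dagprogramma; infer_instance

-- ===== CLAIM (what is proved, stated in full; the proofs are below) =====
def Claim_equal_maak_dagprogramma : Prop := ∀ (attracties : List (List (String × Int))) (horeca : Option (List (String × Int))) (souvenirwinkel : Option (List (String × Int))) (max_tijd : Int), Dom_maak_dagprogramma attracties horeca souvenirwinkel max_tijd → Pre_maak_dagprogramma attracties horeca souvenirwinkel max_tijd → Spec_maak_dagprogramma attracties horeca souvenirwinkel max_tijd (maak_dagprogramma attracties horeca souvenirwinkel max_tijd)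

-- ===== LEMMAS AND PROOFS =====

-- A's loop step, named for the correspondence proof
def pvStapA (max_tijd : Int) (st : (List (List (String × Int))) × Int) (a : List (String × Int)) : (List (List (String × Int))) × Int :=
  let t := pvTijd a
  if st.2 + t ≤ max_tijd then (st.1 ++ [a], st.2 + t) else st

-- A's horeca step applied after the fold
def pvHorecaA (max_tijd : Int) (horeca : Option (List (String × Int))) (st : (List (List (String × Int))) × Int) : (List (List (String × Int))) × Int :=
  match horeca with
  | none => st
  | some h =>
    if h = [] then st
    else
      let t := pvTijd h
      if st.2 + t ≤ max_tijd then (st.1 ++ [h], st.2 + t) else st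

-- core correspondence: B's budget-countdown recursion vs A's foldl-then-horeca
theorem pvPlan_spec (max_tijd : Int) (horeca : Option (List (String × Int))) :
    ∀ (xs : List (List (String × Int))) (acc : List (List (String × Int))) (tot : Int),
      pvHorecaA max_tijd horeca (xs.foldl (pvStapA max_tijd) (acc, tot))
        = (acc ++ (pvPlan horeca xs (max_tijd - tot)).1,
           max_tijd - (pvPlan horeca xs (max_tijd - tot)).2) := by
  intro xs
  induction xs with
  | nil =>
    intro acc tot
    simp only [List.foldl, pvPlan]
    cases horeca with
    | none => simp [pvHorecaA]
    | some h =>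
      by_cases hh : h = []
      · simp [pvHorecaA, hh]
      · have : pvDuur h = pvTijd h := rfl
        simp only [pvHorecaA, if_neg hh, this]
        split_ifs with h1 h2 h2 <;> simp <;> omega
  | cons x tl ih =>
    intro acc tot
    have ht : pvDuur x = pvTijd x := rfl
    simp only [List.foldl, pvPlan, pvStapA, ht]
    by_cases h1 : tot + pvTijd x ≤ max_tijd
    · have h2 : pvTijd x ≤ max_tijd - tot := by omega
      simp only [if_pos h1, if_pos h2]
      have := ih (acc ++ [x]) (tot + pvTijd x)
      have hr : max_tijd - tot - pvTijd x = max_tijd - (tot + pvTijd x) := by omega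
      rw [hr]
      simpa using this
    · have h2 : ¬ pvTijd x ≤ max_tijd - tot := by omega
      simp only [if_neg h1, if_neg h2]
      exact ih acc tot

theorem maak_dagprogramma_eq_alt (attracties : List (List (String × Int))) (horeca : Option (List (String × Int))) (souvenirwinkel : Option (List (String × Int))) (max_tijd : Int) :
    maak_dagprogramma attracties horeca souvenirwinkel max_tijd
      = maak_dagprogramma_alt attracties horeca souvenirwinkel max_tijd := by
  unfold maak_dagprogramma maak_dagprogramma_alt
  have hstep : (fun (st : (List (List (String × Int))) × Int) a =>
      let t := pvTijd a
      if st.2 + t ≤ max_tijd then (st.1 ++ [a], st.2 + t) else st) = pvStapA max_tijd := rfl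
  -- A's st3 = pvHorecaA applied to the fold over take 1 ++ attracties starting at ([],0)
  have hA : ∀ (st2 : (List (List (String × Int))) × Int),
      (match horeca with
       | none => st2
       | some h =>
         if h = [] then st2
         else
           let t := pvTijd h
           if st2.2 + t ≤ max_tijd then (st2.1 ++ [h], st2.2 + t) else st2)
      = pvHorecaA max_tijd horeca st2 := fun st2 => rfl
  cases attracties with
  | nil =>
    have := pvPlan_spec max_tijd horeca [] [] 0
    simp only [List.foldl] at this
    simp only [List.take, List.drop, List.foldl, hA]
    rw [this]
    have h0 : max_tijd - 0 = max_tijd := by omega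
    rw [h0]
    cases souvenirwinkel with
    | none => simp
    | some s =>
      by_cases hs : s = [] <;> simp [hs, pvDuur, pvTijd]
  | cons fav rest =>
    -- A's favourite block = folding pvStapA over [fav, fav]
    have hfav : (let tijd_favoriet := pvTijd fav
        let stA : (List (List (String × Int))) × Int :=
          if 0 + tijd_favoriet ≤ max_tijd then ([] ++ [fav], 0 + tijd_favoriet) else ([], 0)
        if stA.2 + tijd_favoriet ≤ max_tijd then (stA.1 ++ [fav], stA.2 + tijd_favoriet) else stA)
        = [fav, fav].foldl (pvStapA max_tijd) ([], 0) := rfl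
    simp only [hfav, hstep, List.drop_succ_cons, List.drop_zero, hA]
    rw [← List.foldl_append]
    have hc : [fav, fav] ++ rest = (fav :: rest).take 1 ++ (fav :: rest) := by simp
    rw [hc, pvPlan_spec max_tijd horeca ((fav :: rest).take 1 ++ (fav :: rest)) [] 0]
    have h0 : max_tijd - 0 = max_tijd := by omega
    rw [h0]
    cases souvenirwinkel with
    | none => simp
    | some s =>
      by_cases hs : s = [] <;> simp [hs, pvDuur, pvTijd]

-- ===== VERDICT (by name: the statement is the Claim_ definition above) =====
theorem maak_dagprogramma_spec : Claim_equal_maak_dagprogramma := by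
  intro attracties horeca souvenirwinkel max_tijd _ _
  unfold Spec_maak_dagprogramma
  exact maak_dagprogramma_eq_alt attracties horeca souvenirwinkel max_tijd
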